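-- pv_equiv track=rewrite | github.com/muneebaifrah/Unstop-100-Days-Coding-Sprint | Day-67/4.Pass.py | user_logic
-- ===== SOURCE A (Python) =====
-- MOD = 998244353
--
-- def user_logic(N):
--     dp = [1]*10   # index 1..9 used
--
--     for _ in range(N-1):
--         new = [0]*10
--         for d in range(1,10):
--             new[d] = dp[d]
--             if d > 1:
--                 new[d] = (new[d] + dp[d-1]) % MOD
--             if d < 9:
--                 new[d] = (new[d] + dp[d+1]) % MOD
--         dp = new
--
--     return sum(dp[1:10]) % MOD
-- ===== SOURCE B (Python) =====
-- MOD = 998244353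
--
-- def _mat_mult(X, Y):
--     return [[sum(X[i][k] * Y[k][j] for k in range(9)) % MOD for j in range(9)]
--             for i in range(9)]
--
-- def _mat_pow(M, e):
--     result = [[1 if i == j else 0 for j in range(9)] for i in range(9)]
--     base = M
--     while e > 0:
--         if e & 1:
--             result = _mat_mult(result, base)
--         base = _mat_mult(base, base)
--         e >>= 1
--     return result
--
-- def user_logic(N):
--     if N <= 1:
--         return 9
--     M = [[1 if abs(i - j) <= 1 else 0 for j in range(9)] for i in range(9)]
--     P = _mat_pow(M, N - 1)
--     return sum(sum(row) % MOD for row in P) % MOD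
-- ===== Notes on version B (the rewrite author's own statement) =====
-- stated objective: faster
-- what changed: Replaced the O(N) dynamic-programming loop over length-10 dp arrays by binary exponentiation of the 9x9 tridiagonal transition matrix, so the answer is computed in O(log N) matrix multiplications.
import Mathlib
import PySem

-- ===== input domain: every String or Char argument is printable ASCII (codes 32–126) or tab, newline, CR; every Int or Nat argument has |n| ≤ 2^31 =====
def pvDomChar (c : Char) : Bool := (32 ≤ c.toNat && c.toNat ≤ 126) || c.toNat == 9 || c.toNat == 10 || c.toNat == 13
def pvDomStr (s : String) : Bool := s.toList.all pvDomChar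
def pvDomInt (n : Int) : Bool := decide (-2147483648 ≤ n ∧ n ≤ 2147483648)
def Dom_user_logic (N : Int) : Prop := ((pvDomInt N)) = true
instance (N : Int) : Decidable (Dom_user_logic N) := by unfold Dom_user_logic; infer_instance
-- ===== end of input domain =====

-- B replaces A's O(N) dp loop by binary exponentiation of the 9x9 transition matrix (O(log N)); equal return value on all inputs.

-- ===== PORT A =====
def pvMOD : Int := 998244353

-- one pass of A's inner 'for d in range(1,10)' loop building 'new' (new[0] stays 0)
def stepA (dp : List Int) : List Int :=
  0 :: ((PySem.List.pyRange 1 10 1).map fun d =>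
    let v0 := dp.getD d.toNat 0
    let v1 := if d > 1 then PySem.Int.mod (v0 + dp.getD (d - 1).toNat 0) pvMOD else v0
    if d < 9 then PySem.Int.mod (v1 + dp.getD (d + 1).toNat 0) pvMOD else v1)

-- 'for _ in range(N-1)' as structural recursion on the iteration count
def iterA : Nat → List Int → List Int
  | 0, dp => dp
  | k + 1, dp => iterA k (stepA dp)

def user_logic (N : Int) : Int :=
  let dp := iterA (N - 1).toNat (List.replicate 10 1)
  PySem.Int.mod (PySem.List.slice dp (some 1) (some 10)).sum pvMOD

-- ===== PORT B =====
-- _mat_mult of Source B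
def matMulB (X Y : List (List Int)) : List (List Int) :=
  (List.range 9).map fun i => (List.range 9).map fun j =>
    PySem.Int.mod ((List.range 9).map fun k => (X.getD i []).getD k 0 * (Y.getD k []).getD j 0).sum pvMOD

def idMatB : List (List Int) :=
  (List.range 9).map fun i => (List.range 9).map fun j => if i = j then (1 : Int) else 0

-- the 'while e > 0' loop of _mat_pow, state (base, result), recursing on e
def matPowB (base result : List (List Int)) (e : Nat) : List (List Int) :=
  if e = 0 then result
  else matPowB (matMulB base base) (if e % 2 = 1 then matMulB result base else result) (e / 2)
termination_by e
decreasing_by exact Nat.div_lt_self (Nat.pos_of_ne_zero (by assumption)) one_lt_two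

def mat9B : List (List Int) :=
  (List.range 9).map fun i => (List.range 9).map fun j => if |(i : Int) - (j : Int)| ≤ 1 then (1 : Int) else 0

def user_logic_alt (N : Int) : Int :=
  if N ≤ 1 then 9
  else
    let P := matPowB mat9B idMatB (N - 1).toNat
    PySem.Int.mod (P.map fun row => PySem.Int.mod row.sum pvMOD).sum pvMOD

-- ===== PRECONDITION & SPEC =====
def Spec_user_logic (N : Int) (out : Int) : Prop := out = user_logic_alt N
instance (N : Int) (out : Int) : Decidable (Spec_user_logic N out) := by unfold Spec_user_logic; infer_instance

-- ===== CLAIM (what is proved, stated in full; the proofs are below) =====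
def Claim_equal_user_logic : Prop := ∀ (N : Int), Dom_user_logic N → Spec_user_logic N (user_logic N)

-- ===== LEMMAS AND PROOFS =====

-- everything is compared in ZMod 998244353
def pvZ (x : Int) : ZMod 998244353 := (x : ZMod 998244353)

def toM (X : List (List Int)) : Matrix (Fin 9) (Fin 9) (ZMod 998244353) :=
  fun i j => pvZ ((X.getD i []).getD j 0)

def toV (dp : List Int) : Fin 9 → ZMod 998244353 := fun i => pvZ (dp.getD (i + 1) 0)

lemma castMod (x : Int) : pvZ (PySem.Int.mod x pvMOD) = pvZ x := by
  unfold pvZ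
  rw [PySem.Int.mod_eq_emod_of_pos (by norm_num [pvMOD])]
  have : pvMOD = ((998244353 : ℕ) : ℤ) := by norm_num [pvMOD]
  rw [this, ZMod.intCast_mod]

lemma castMod' (x : Int) :
    ((PySem.Int.mod x pvMOD : Int) : ZMod 998244353) = (x : ZMod 998244353) := castMod x

lemma sum_map_getD {α β : Type} [AddCommMonoid β] (l : List α) (g : α → β) (d : α) :
    (l.map g).sum = ∑ i ∈ Finset.range l.length, g (l.getD i d) := by
  induction l with
  | nil => simp
  | cons a l ih =>
      simp only [List.map_cons, List.sum_cons, List.length_cons, Finset.sum_range_succ']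
      rw [ih, add_comm]
      congr 1

lemma rowcast (r : List Int) (hr : r.length = 9) :
    pvZ r.sum = ∑ j ∈ Finset.range 9, pvZ (r.getD j 0) := by
  have h1 : pvZ r.sum = (r.map pvZ).sum := by
    simp only [pvZ, Int.cast_list_sum]
    rfl
  rw [h1, sum_map_getD r pvZ 0, hr]

lemma getD_map_range' {β : Type} (f : ℕ → β) (n i : ℕ) (d : β) (h : i < n) :
    ((List.range n).map f).getD i d = f i := by
  rw [List.getD_eq_getElem?_getD, List.getElem?_map, List.getElem?_range h]
  rfl

lemma toM_matMul (X Y : List (List Int)) : toM (matMulB X Y) = toM X * toM Y := by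
  funext i j
  show pvZ (((matMulB X Y).getD i []).getD j 0) = _
  unfold matMulB
  rw [getD_map_range' _ 9 i.val _ i.isLt, getD_map_range' _ 9 j.val _ j.isLt, castMod]
  rw [Matrix.mul_apply]
  simp only [List.range_succ, List.range_zero, List.nil_append, List.cons_append,
    List.map_cons, List.map_nil, List.sum_cons, List.sum_nil, Fin.sum_univ_succ,
    Finset.univ_eq_empty, Finset.sum_empty]
  simp only [pvZ, toM, Int.cast_add, Int.cast_mul, add_zero]
  norm_num

lemma toM_id : toM idMatB = 1 := by
  funext i j
  show pvZ ((idMatB.getD i []).getD j 0) = _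
  unfold idMatB
  rw [getD_map_range' _ 9 i.val _ i.isLt, getD_map_range' _ 9 j.val _ j.isLt]
  rw [Matrix.one_apply]
  by_cases h : i = j
  · simp [h, pvZ]
  · have : (i : ℕ) ≠ (j : ℕ) := fun hc => h (Fin.ext hc)
    simp [h, this, pvZ]

lemma toM_matPow (e : Nat) (base result : List (List Int)) :
    toM (matPowB base result e) = toM result * toM base ^ e := by
  induction e using Nat.strong_induction_on generalizing base result with
  | _ e ih =>
    rw [matPowB]
    by_cases h0 : e = 0
    · simp [h0]
    · simp only [h0, if_false]
      rw [ih (e / 2) (Nat.div_lt_self (Nat.pos_of_ne_zero h0) one_lt_two)]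
      rw [toM_matMul]
      have hbb : (toM base * toM base) ^ (e / 2) = toM base ^ (2 * (e / 2)) := by
        rw [two_mul, pow_add]
        exact (Commute.refl (toM base)).mul_pow (e / 2)
      by_cases hp : e % 2 = 1
      · have he : 2 * (e / 2) + 1 = e := by omega
        simp only [hp, if_true, toM_matMul, hbb]
        rw [mul_assoc, ← pow_succ']
        have he2 : 2 * (e / 2) + 1 = e := by omega
        rw [he2]
      · have he : 2 * (e / 2) = e := by omega
        simp [hp, hbb, he]

def wfMat (X : List (List Int)) : Prop := X.length = 9 ∧ ∀ r ∈ X, r.length = 9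

lemma wf_matMul (X Y : List (List Int)) : wfMat (matMulB X Y) := by
  constructor
  · simp [matMulB]
  · intro r hr
    simp only [matMulB, List.mem_map, List.mem_range] at hr
    obtain ⟨i, -, rfl⟩ := hr
    simp

lemma wf_matPow (e : Nat) (base result : List (List Int)) (h : wfMat result) :
    wfMat (matPowB base result e) := by
  induction e using Nat.strong_induction_on generalizing base result with
  | _ e ih =>
    rw [matPowB]
    by_cases h0 : e = 0
    · simpa [h0] using h
    · simp only [h0, if_false]
      refine ih (e / 2) (Nat.div_lt_self (Nat.pos_of_ne_zero h0) one_lt_two) _ _ ?_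
      by_cases hp : e % 2 = 1 <;> simp [hp, h, wf_matMul]

lemma wf_id : wfMat idMatB := by
  constructor
  · simp [idMatB]
  · intro r hr
    simp only [idMatB, List.mem_map, List.mem_range] at hr
    obtain ⟨i, -, rfl⟩ := hr
    simp

lemma toV_stepA (dp : List Int) : toV (stepA dp) = (toM mat9B).mulVec (toV dp) := by
  have pr : PySem.List.pyRange 1 10 1 = [1, 2, 3, 4, 5, 6, 7, 8, 9] := by decide
  have m9 : mat9B = [[1,1,0,0,0,0,0,0,0],[1,1,1,0,0,0,0,0,0],[0,1,1,1,0,0,0,0,0],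
      [0,0,1,1,1,0,0,0,0],[0,0,0,1,1,1,0,0,0],[0,0,0,0,1,1,1,0,0],
      [0,0,0,0,0,1,1,1,0],[0,0,0,0,0,0,1,1,1],[0,0,0,0,0,0,0,1,1]] := by decide
  funext i
  show toV (stepA dp) i = ∑ j, toM mat9B i j * toV dp j
  fin_cases i <;>
    simp only [stepA, pr, m9, toV, toM, List.map_cons, List.map_nil, Fin.sum_univ_succ,
      Finset.univ_eq_empty, Finset.sum_empty] <;>
    norm_num [castMod] <;>
    simp [pvZ, castMod'] <;> ring

lemma toV_iterA (k : Nat) (dp : List Int) :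
    toV (iterA k dp) = ((toM mat9B) ^ k).mulVec (toV dp) := by
  induction k generalizing dp with
  | zero => simp [iterA]
  | succ k ih =>
      show toV (iterA k (stepA dp)) = _
      rw [ih, toV_stepA, Matrix.mulVec_mulVec, ← pow_succ]

lemma len_stepA (dp : List Int) : (stepA dp).length = 10 := by
  simp [stepA, PySem.List.length_pyRange_one]

lemma len_iterA (k : Nat) (dp : List Int) (h : dp.length = 10) : (iterA k dp).length = 10 := by
  induction k generalizing dp with
  | zero => exact h
  | succ k ih => exact ih (stepA dp) (len_stepA dp)

lemma castB (X : List (List Int)) (h : wfMat X) :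
    pvZ (X.map fun row => PySem.Int.mod row.sum pvMOD).sum = ∑ i : Fin 9, ∑ j : Fin 9, toM X i j := by
  obtain ⟨hl, hr⟩ := h
  have h1 : pvZ (X.map fun row => PySem.Int.mod row.sum pvMOD).sum
      = ((X.map fun row => pvZ (PySem.Int.mod row.sum pvMOD)).sum) := by
    simp only [pvZ, Int.cast_list_sum, List.map_map]
    rfl
  rw [h1, sum_map_getD X _ [], hl, ← Fin.sum_univ_eq_sum_range]
  refine Finset.sum_congr rfl fun i _ => ?_
  have hrow : (X.getD (i : ℕ) []).length = 9 := by
    refine hr _ ?_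
    rw [List.getD_eq_getElem X [] (by omega)]
    exact X.getElem_mem _
  rw [castMod, rowcast _ hrow, ← Fin.sum_univ_eq_sum_range]
  rfl

lemma castA (dp : List Int) (h : dp.length = 10) :
    pvZ (PySem.List.slice dp (some 1) (some 10)).sum = ∑ i : Fin 9, toV dp i := by
  have hs : PySem.List.slice dp (some 1) (some 10) = dp.tail := by
    have := PySem.List.slice_natCast (xs := dp) (a := 1) (b := 10)
    norm_num at this
    rw [this, ← List.drop_one, List.take_of_length_le (by simp [h])]
  have hlen : dp.tail.length = 9 := by simp [h]
  rw [hs, rowcast _ hlen, ← Fin.sum_univ_eq_sum_range]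
  refine Finset.sum_congr rfl fun i _ => ?_
  obtain ⟨a, l, rfl⟩ : ∃ a l, dp = a :: l := by
    cases dp with
    | nil => simp at h
    | cons a l => exact ⟨a, l, rfl⟩
  rfl

lemma mod_eq_of_cast_eq (a b : Int) (h : pvZ a = pvZ b) :
    PySem.Int.mod a pvMOD = PySem.Int.mod b pvMOD := by
  rw [PySem.Int.mod_eq_emod_of_pos (by norm_num [pvMOD]), PySem.Int.mod_eq_emod_of_pos (by norm_num [pvMOD])]
  have h2 : a ≡ b [ZMOD (998244353 : ℕ)] := (ZMod.intCast_eq_intCast_iff a b _).mp h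
  have h3 : a % ((998244353 : ℕ) : ℤ) = b % ((998244353 : ℕ) : ℤ) := h2
  simpa [pvMOD] using h3

-- ===== VERDICT (by name: the statement is the Claim_ definition above) =====
theorem user_logic_spec : Claim_equal_user_logic := by
  intro N _
  unfold Spec_user_logic user_logic user_logic_alt
  by_cases hN : N ≤ 1
  · have h0 : (N - 1).toNat = 0 := by omega
    rw [h0, if_pos hN]
    decide
  · rw [if_neg hN]
    apply mod_eq_of_cast_eq
    rw [castA _ (len_iterA _ _ (by simp)), castB _ (wf_matPow _ _ _ wf_id)]
    rw [toV_iterA, toM_matPow, toM_id, one_mul]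
    have hv : toV (List.replicate 10 1) = fun _ => (1 : ZMod 998244353) := by
      funext i; fin_cases i <;> rfl
    rw [hv]
    simp [Matrix.mulVec, dotProduct]
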